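-- pv_equiv track=rewrite | github.com/Sasi356/test-code | 4.py | solve
-- ===== SOURCE A (Python) =====
-- def solve(matrix):
--     n = len(matrix)
--     left,top,right,bottom = n-1,n-1,0,0
--     for i in range(n):
--         for j in range(n):
--             if matrix[i][j]==0:
--                 left = min(left,j)
--                 top = min(top,i)
--                 right = max(right,j)
--                 bottom = max(bottom,i)
--     return [(top,left),(top,right),(bottom,left),(bottom,right)]
-- ===== SOURCE B (Python) =====
-- def solve(matrix):
--     n = len(matrix)
--     rows = [i for i in range(n) if any(matrix[i][j] == 0 for j in range(n))]
--     cols = [j for j in range(n) if any(matrix[i][j] == 0 for i in range(n))]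
--     top = min([n - 1] + rows)
--     bottom = max([0] + rows)
--     left = min([n - 1] + cols)
--     right = max([0] + cols)
--     return [(top, left), (top, right), (bottom, left), (bottom, right)]
-- ===== Notes on version B (the rewrite author's own statement) =====
-- stated objective: alternative
-- what changed: Replaces the fused double loop with four min/max accumulators by separate computations of the zero-containing row and column index lists, taking min/max of those lists seeded with the same sentinels.
import Mathlib
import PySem

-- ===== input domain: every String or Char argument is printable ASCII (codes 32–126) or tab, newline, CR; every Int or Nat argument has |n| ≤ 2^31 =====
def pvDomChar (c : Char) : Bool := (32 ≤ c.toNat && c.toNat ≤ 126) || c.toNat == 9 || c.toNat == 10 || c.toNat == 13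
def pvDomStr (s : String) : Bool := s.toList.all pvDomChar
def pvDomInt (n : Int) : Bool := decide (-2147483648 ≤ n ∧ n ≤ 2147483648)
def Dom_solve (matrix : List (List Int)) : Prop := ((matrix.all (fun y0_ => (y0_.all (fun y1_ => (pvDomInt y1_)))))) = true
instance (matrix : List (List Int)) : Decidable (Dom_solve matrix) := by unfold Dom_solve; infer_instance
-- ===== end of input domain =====

-- B computes the zero-containing row- and column-index lists separately and takes
-- min/max of each (seeded with A's sentinels) instead of A's fused double loop with
-- four accumulators; same cost, different decomposition.

-- ===== PORT A =====
-- out-of-range matrix[i][j] would raise in Python; the .getD defaults are never hit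
-- on inputs satisfying Pre_solve (all indices are in range there), so the port is
-- exact on Pre_solve.
def solve (matrix : List (List Int)) : List (Int × Int) :=
  let n : Int := matrix.length
  let s := (PySem.List.pyRange 0 n 1).foldl (fun (s : Int × Int × Int × Int) i =>
      (PySem.List.pyRange 0 n 1).foldl (fun (s : Int × Int × Int × Int) j =>
        if (PySem.List.pyGet? ((PySem.List.pyGet? matrix i).getD []) j).getD 1 == 0 then
          (min s.1 j, min s.2.1 i, max s.2.2.1 j, max s.2.2.2 i)
        else s) s) (n - 1, n - 1, 0, 0)
  -- s = (left, top, right, bottom)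
  [(s.2.1, s.1), (s.2.1, s.2.2.1), (s.2.2.2, s.1), (s.2.2.2, s.2.2.1)]

-- ===== PORT B =====
-- same access discipline: exact on Pre_solve, where every index is in range.
def solve_alt (matrix : List (List Int)) : List (Int × Int) :=
  let n : Int := matrix.length
  let rows := (PySem.List.pyRange 0 n 1).filter (fun i =>
      (PySem.List.pyRange 0 n 1).any (fun j => (PySem.List.pyGet? ((PySem.List.pyGet? matrix i).getD []) j).getD 1 == 0))
  let cols := (PySem.List.pyRange 0 n 1).filter (fun j =>
      (PySem.List.pyRange 0 n 1).any (fun i => (PySem.List.pyGet? ((PySem.List.pyGet? matrix i).getD []) j).getD 1 == 0))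
  let top := (PySem.List.min? ((n - 1) :: rows) (fun y => y)).getD 0
  let bottom := (PySem.List.max? ((0 : Int) :: rows) (fun y => y)).getD 0
  let left := (PySem.List.min? ((n - 1) :: cols) (fun y => y)).getD 0
  let right := (PySem.List.max? ((0 : Int) :: cols) (fun y => y)).getD 0
  [(top, left), (top, right), (bottom, left), (bottom, right)]

-- ===== PRECONDITION & SPEC =====
-- Pre_ excludes exactly the inputs on which Python A raises IndexError:
-- some row shorter than the number of rows (matrix[i][j] with j in range(len(matrix))).
def Pre_solve (matrix : List (List Int)) : Prop :=
  ∀ row ∈ matrix, matrix.length ≤ row.length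
instance (matrix : List (List Int)) : Decidable (Pre_solve matrix) := by unfold Pre_solve; infer_instance
def pvWitness_solve : List (List Int) := [[1, 0], [0, 1]]

def Spec_solve (matrix : List (List Int)) (out : List (Int × Int)) : Prop := out = solve_alt matrix
instance (matrix : List (List Int)) (out : List (Int × Int)) : Decidable (Spec_solve matrix out) := by unfold Spec_solve; infer_instance

-- ===== CLAIM (what is proved, stated in full; the proofs are below) =====
def Claim_equal_solve : Prop := ∀ (matrix : List (List Int)), Dom_solve matrix → Pre_solve matrix → Spec_solve matrix (solve matrix)

-- ===== LEMMAS AND PROOFS =====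

-- split a fold over a 4-tuple state with componentwise step into four folds
lemma pv_quad_split (l : List Int) (f1 f2 f3 f4 : Int → Int → Int) (a b c d : Int) :
    l.foldl (fun (s : Int × Int × Int × Int) x =>
        (f1 s.1 x, f2 s.2.1 x, f3 s.2.2.1 x, f4 s.2.2.2 x)) (a, b, c, d)
      = (l.foldl f1 a, l.foldl f2 b, l.foldl f3 c, l.foldl f4 d) := by
  induction l generalizing a b c d with
  | nil => rfl
  | cons x t ih => simpa using ih (f1 a x) (f2 b x) (f3 c x) (f4 d x)

lemma pv_fold_if_min (l : List Int) (q : Int → Bool) (a : Int) :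
    l.foldl (fun a x => if q x then min a x else a) a = (l.filter q).foldl min a := by
  induction l generalizing a with
  | nil => rfl
  | cons x t ih => by_cases h : q x <;> simp [h, ih]

lemma pv_fold_if_max (l : List Int) (q : Int → Bool) (a : Int) :
    l.foldl (fun a x => if q x then max a x else a) a = (l.filter q).foldl max a := by
  induction l generalizing a with
  | nil => rfl
  | cons x t ih => by_cases h : q x <;> simp [h, ih]

lemma pv_fold_if_min_const (l : List Int) (q : Int → Bool) (c a : Int) :
    l.foldl (fun a x => if q x then min a c else a) a = if l.any q then min a c else a := by
  induction l generalizing a with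
  | nil => rfl
  | cons x t ih =>
      by_cases h : q x <;> simp [h, ih, ]

lemma pv_fold_if_max_const (l : List Int) (q : Int → Bool) (c a : Int) :
    l.foldl (fun a x => if q x then max a c else a) a = if l.any q then max a c else a := by
  induction l generalizing a with
  | nil => rfl
  | cons x t ih =>
      by_cases h : q x <;> simp [h, ih, ]

lemma pv_foldl_min_le_init (l : List Int) (a : Int) : l.foldl min a ≤ a := by
  induction l generalizing a with
  | nil => simp
  | cons x t ih => exact le_trans (ih (min a x)) (min_le_left a x)

lemma pv_foldl_min_le_mem (l : List Int) (a x : Int) (hx : x ∈ l) : l.foldl min a ≤ x := by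
  induction l generalizing a with
  | nil => simp at hx
  | cons y t ih =>
      rcases List.mem_cons.mp hx with rfl | h
      · exact le_trans (pv_foldl_min_le_init t (min a x)) (min_le_right a x)
      · exact ih (min a y) h


lemma pv_foldl_min_eq_or_mem (l : List Int) (a : Int) :
    l.foldl min a = a ∨ l.foldl min a ∈ l := by
  induction l generalizing a with
  | nil => simp
  | cons x t ih =>
      rcases ih (min a x) with h | h
      · rcases le_total a x with hax | hax
        · left; simpa [min_eq_left hax] using h
        · right
          rw [List.foldl_cons, h, min_eq_right hax]
          exact List.mem_cons_self
      · right; exact List.mem_cons_of_mem _ h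

lemma pv_foldl_max_le_init (l : List Int) (a : Int) : a ≤ l.foldl max a := by
  induction l generalizing a with
  | nil => simp
  | cons x t ih => exact le_trans (le_max_left a x) (ih (max a x))

lemma pv_foldl_max_le_mem (l : List Int) (a x : Int) (hx : x ∈ l) : x ≤ l.foldl max a := by
  induction l generalizing a with
  | nil => simp at hx
  | cons y t ih =>
      rcases List.mem_cons.mp hx with rfl | h
      · exact le_trans (le_max_right a x) (pv_foldl_max_le_init t (max a x))
      · exact ih (max a y) h

lemma pv_foldl_max_eq_or_mem (l : List Int) (a : Int) :
    l.foldl max a = a ∨ l.foldl max a ∈ l := by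
  induction l generalizing a with
  | nil => simp
  | cons x t ih =>
      rcases ih (max a x) with h | h
      · rcases le_total x a with hax | hax
        · left; simpa [max_eq_left hax] using h
        · right
          rw [List.foldl_cons, h, max_eq_right hax]
          exact List.mem_cons_self
      · right; exact List.mem_cons_of_mem _ h

lemma pv_foldl_min_set_eq (l1 l2 : List Int) (a : Int) (h : ∀ x, x ∈ l1 ↔ x ∈ l2) :
    l1.foldl min a = l2.foldl min a := by
  apply le_antisymm
  · rcases pv_foldl_min_eq_or_mem l2 a with h2 | h2
    · rw [h2]; exact pv_foldl_min_le_init l1 a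
    · exact pv_foldl_min_le_mem l1 a _ ((h _).mpr h2)
  · rcases pv_foldl_min_eq_or_mem l1 a with h1 | h1
    · rw [h1]; exact pv_foldl_min_le_init l2 a
    · exact pv_foldl_min_le_mem l2 a _ ((h _).mp h1)

lemma pv_foldl_max_set_eq (l1 l2 : List Int) (a : Int) (h : ∀ x, x ∈ l1 ↔ x ∈ l2) :
    l1.foldl max a = l2.foldl max a := by
  apply le_antisymm
  · rcases pv_foldl_max_eq_or_mem l1 a with h1 | h1
    · rw [h1]; exact pv_foldl_max_le_init l2 a
    · exact pv_foldl_max_le_mem l2 a _ ((h _).mp h1)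
  · rcases pv_foldl_max_eq_or_mem l2 a with h2 | h2
    · rw [h2]; exact pv_foldl_max_le_init l1 a
    · exact pv_foldl_max_le_mem l1 a _ ((h _).mpr h2)

lemma pv_foldl_min_flatMap (I : List Int) (g : Int → List Int) (a : Int) :
    (I.flatMap g).foldl min a = I.foldl (fun a i => (g i).foldl min a) a := by
  induction I generalizing a with
  | nil => rfl
  | cons i t ih => simp [List.flatMap_cons, List.foldl_append, ih]

lemma pv_foldl_max_flatMap (I : List Int) (g : Int → List Int) (a : Int) :
    (I.flatMap g).foldl max a = I.foldl (fun a i => (g i).foldl max a) a := by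
  induction I generalizing a with
  | nil => rfl
  | cons i t ih => simp [List.flatMap_cons, List.foldl_append, ih]

-- the fused double loop equals the four decomposed reductions
lemma pv_core (R : List Int) (P : Int → Int → Bool) (a0 b0 : Int) :
    R.foldl (fun (s : Int × Int × Int × Int) i =>
        R.foldl (fun (s : Int × Int × Int × Int) j =>
          if P i j then (min s.1 j, min s.2.1 i, max s.2.2.1 j, max s.2.2.2 i) else s) s)
        (a0, a0, b0, b0)
      = ((R.filter (fun j => R.any (fun i => P i j))).foldl min a0,
         (R.filter (fun i => R.any (fun j => P i j))).foldl min a0,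
         (R.filter (fun j => R.any (fun i => P i j))).foldl max b0,
         (R.filter (fun i => R.any (fun j => P i j))).foldl max b0) := by
  have hinner : ∀ (s : Int × Int × Int × Int) (i : Int),
      R.foldl (fun (s : Int × Int × Int × Int) j =>
          if P i j then (min s.1 j, min s.2.1 i, max s.2.2.1 j, max s.2.2.2 i) else s) s
        = (R.foldl (fun a j => if P i j then min a j else a) s.1,
           R.foldl (fun a j => if P i j then min a i else a) s.2.1,
           R.foldl (fun a j => if P i j then max a j else a) s.2.2.1,
           R.foldl (fun a j => if P i j then max a i else a) s.2.2.2) := by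
    intro s i
    obtain ⟨a, b, c, d⟩ := s
    rw [show (fun (s : Int × Int × Int × Int) j =>
          if P i j then (min s.1 j, min s.2.1 i, max s.2.2.1 j, max s.2.2.2 i) else s)
        = (fun (s : Int × Int × Int × Int) j =>
          (if P i j then min s.1 j else s.1, if P i j then min s.2.1 i else s.2.1,
           if P i j then max s.2.2.1 j else s.2.2.1, if P i j then max s.2.2.2 i else s.2.2.2))
      from funext fun s => funext fun j => by split <;> rfl]
    exact pv_quad_split R (fun a j => if P i j then min a j else a)
      (fun a j => if P i j then min a i else a)
      (fun a j => if P i j then max a j else a)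
      (fun a j => if P i j then max a i else a) a b c d
  rw [show (fun (s : Int × Int × Int × Int) i =>
        R.foldl (fun (s : Int × Int × Int × Int) j =>
          if P i j then (min s.1 j, min s.2.1 i, max s.2.2.1 j, max s.2.2.2 i) else s) s)
      = (fun (s : Int × Int × Int × Int) i =>
        (R.foldl (fun a j => if P i j then min a j else a) s.1,
         R.foldl (fun a j => if P i j then min a i else a) s.2.1,
         R.foldl (fun a j => if P i j then max a j else a) s.2.2.1,
         R.foldl (fun a j => if P i j then max a i else a) s.2.2.2))
    from funext fun s => funext fun i => hinner s i]
  rw [pv_quad_split R (fun a i => R.foldl (fun a j => if P i j then min a j else a) a)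
      (fun a i => R.foldl (fun a j => if P i j then min a i else a) a)
      (fun a i => R.foldl (fun a j => if P i j then max a j else a) a)
      (fun a i => R.foldl (fun a j => if P i j then max a i else a) a) a0 a0 b0 b0]
  congr 1
  -- left
  · rw [show (fun (a i : Int) => R.foldl (fun a j => if P i j then min a j else a) a)
        = (fun (a i : Int) => (R.filter (P i)).foldl min a)
      from funext fun a => funext fun i => pv_fold_if_min R (P i) a]
    rw [← pv_foldl_min_flatMap R (fun i => R.filter (P i)) a0]
    apply pv_foldl_min_set_eq
    intro x
    simp only [List.mem_flatMap, List.mem_filter, List.any_eq_true]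
    tauto
  congr 1
  -- top
  · rw [show (fun (a i : Int) => R.foldl (fun a j => if P i j then min a i else a) a)
        = (fun (a i : Int) => if R.any (P i) then min a i else a)
      from funext fun a => funext fun i => pv_fold_if_min_const R (P i) i a]
    rw [pv_fold_if_min R (fun i => R.any (P i)) a0]
  congr 1
  -- right
  · rw [show (fun (a i : Int) => R.foldl (fun a j => if P i j then max a j else a) a)
        = (fun (a i : Int) => (R.filter (P i)).foldl max a)
      from funext fun a => funext fun i => pv_fold_if_max R (P i) a]
    rw [← pv_foldl_max_flatMap R (fun i => R.filter (P i)) b0]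
    apply pv_foldl_max_set_eq
    intro x
    simp only [List.mem_flatMap, List.mem_filter, List.any_eq_true]
    tauto
  -- bottom
  · rw [show (fun (a i : Int) => R.foldl (fun a j => if P i j then max a i else a) a)
        = (fun (a i : Int) => if R.any (P i) then max a i else a)
      from funext fun a => funext fun i => pv_fold_if_max_const R (P i) i a]
    rw [pv_fold_if_max R (fun i => R.any (P i)) b0]

-- ===== VERDICT (by name: the statement is the Claim_ definition above) =====
theorem solve_spec : Claim_equal_solve := by
  intro matrix _ _
  show solve matrix = solve_alt matrix
  simp only [solve, solve_alt]
  rw [pv_core ((PySem.List.pyRange 0 (matrix.length : Int) 1))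
      (fun i j => (PySem.List.pyGet? ((PySem.List.pyGet? matrix i).getD []) j).getD 1 == 0)]
  simp [PySem.List.min?_id_cons, PySem.List.max?_id_cons]
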